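-- pv_equiv track=rewrite | github.com/stefanvulpe-dev/python-programming | Lab_01/words_counter.py | words_counter
-- ===== SOURCE A (Python) =====
-- def words_counter(text):
--     frequencies = {}
--     for word in text.lower().split(' '):
--         if word not in frequencies:
--             frequencies[word] = 1
--         else:
--             frequencies[word] += 1
--
--     return len(frequencies)
-- ===== SOURCE B (Python) =====
-- def words_counter(text):
--     words = sorted(text.lower().split(' '))
--     count = 1
--     prev = words[0]
--     for w in words[1:]:
--         if w != prev:
--             count += 1
--             prev = w
--     return count
-- ===== Notes on version B (the rewrite author's own statement) =====
-- stated objective: alternative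
-- what changed: B counts distinct words by sorting the word list and scanning adjacent pairs once, instead of building a hash-table of frequencies and taking its length.
import Mathlib
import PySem

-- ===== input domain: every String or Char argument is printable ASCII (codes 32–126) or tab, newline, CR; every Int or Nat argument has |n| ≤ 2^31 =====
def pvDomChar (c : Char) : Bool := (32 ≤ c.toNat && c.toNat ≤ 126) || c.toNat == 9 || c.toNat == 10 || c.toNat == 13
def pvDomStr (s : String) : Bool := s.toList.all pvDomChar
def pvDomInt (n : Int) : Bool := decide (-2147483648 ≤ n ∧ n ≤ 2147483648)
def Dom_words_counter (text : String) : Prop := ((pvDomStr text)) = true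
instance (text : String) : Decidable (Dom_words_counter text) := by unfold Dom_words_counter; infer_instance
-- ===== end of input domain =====

-- B counts the distinct words of text.lower().split(' ') by sorting the list and scanning
-- adjacent pairs once, instead of A's frequency dictionary whose length is returned.

-- ===== PORT A =====
-- the loop body: if word not in frequencies: frequencies[word] = 1 else: frequencies[word] += 1
def wcStep (d : PySem.Dict String Int) (word : String) : PySem.Dict String Int :=
  if d.contains word = false then d.insert word 1 else d.modify word 0 (· + 1)

def words_counter (text : String) : Int :=
  let frequencies : PySem.Dict String Int := PySem.Dict.empty
  let frequencies :=
    ((PySem.Str.split? (PySem.Str.lower text) " ").getD []).foldl wcStep frequencies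
  (frequencies.size : Int)

-- ===== PORT B =====
-- the for-loop of Source B: state (prev, count), walking the tail of the sorted word list
def wcScan (prev : String) (count : Int) : List String → Int
  | [] => count
  | w :: t => if w ≠ prev then wcScan w (count + 1) t else wcScan prev count t

def words_counter_alt (text : String) : Int :=
  let words := PySem.List.sorted ((PySem.Str.split? (PySem.Str.lower text) " ").getD []) (fun x => x) false
  match words with
  | [] => 0          -- unreachable: split(' ') always returns a nonempty list
  | p :: rest => wcScan p 1 rest

-- ===== PRECONDITION & SPEC =====
def Spec_words_counter (text : String) (out : Int) : Prop := out = words_counter_alt text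
instance (text : String) (out : Int) : Decidable (Spec_words_counter text out) := by unfold Spec_words_counter; infer_instance

-- ===== CLAIM (what is proved, stated in full; the proofs are below) =====
def Claim_equal_words_counter : Prop := ∀ (text : String), Dom_words_counter text → Spec_words_counter text (words_counter text)

-- ===== LEMMAS AND PROOFS =====

-- A side: one loop step only appends the key if it is new
theorem wcStep_keys (d : PySem.Dict String Int) (w : String) :
    (wcStep d w).keys = PySem.Set.add d.keys w := by
  unfold wcStep PySem.Set.add
  by_cases h : d.contains w = false
  · rw [if_pos h, PySem.Dict.keys_insert_of_not_contains d 1 h]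
    have hw : w ∉ d.keys := fun hm => by
      simp [(PySem.Dict.contains_iff_mem_keys d w).mpr hm] at h
    simp [List.contains_eq_mem, hw]
  · have h' : d.contains w = true := by revert h; cases d.contains w <;> simp
    rw [if_neg h, PySem.Dict.keys_modify, PySem.Dict.keys_insert_of_contains _ _ h']
    have hw : w ∈ d.keys := (PySem.Dict.contains_iff_mem_keys d w).mp h'
    simp [List.contains_eq_mem, hw]

theorem wcFold_keys (l : List String) (d : PySem.Dict String Int) :
    (l.foldl wcStep d).keys = PySem.Set.update d.keys l := by
  induction l generalizing d with
  | nil => rfl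
  | cons w t ih =>
    simp only [List.foldl_cons, PySem.Set.update, List.foldl_cons, ih, wcStep_keys]

theorem ofList_length (xs : List String) :
    (PySem.Set.ofList xs).length = xs.toFinset.card := by
  have hn := PySem.Set.nodup_ofList xs
  have hts : (PySem.Set.ofList xs : List String).toFinset = xs.toFinset := by
    ext y; simp [List.mem_toFinset, PySem.Set.mem_ofList]
  rw [← List.toFinset_card_of_nodup hn, hts]

theorem wcA_card (ws : List String) :
    ((ws.foldl wcStep PySem.Dict.empty).size : Int) = (ws.toFinset.card : Int) := by
  have h1 : (ws.foldl wcStep PySem.Dict.empty).size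
      = (ws.foldl wcStep PySem.Dict.empty).keys.length := by
    simp [PySem.Dict.size, PySem.Dict.keys]
  rw [h1, wcFold_keys]
  have : PySem.Set.update (PySem.Dict.empty (κ := String) (ν := Int)).keys ws
      = PySem.Set.ofList ws := rfl
  rw [this, ofList_length]

-- B side: the adjacency scan of a sorted tail counts the distinct elements
theorem wcScan_card (l : List String) (prev : String) (c : Int)
    (h1 : l.Pairwise (· ≤ ·)) (h2 : ∀ x ∈ l, prev ≤ x) :
    wcScan prev c l = c - 1 + ((prev :: l).toFinset.card : Int) := by
  induction l generalizing prev c with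
  | nil => simp [wcScan]
  | cons w t ih =>
    rcases List.pairwise_cons.mp h1 with ⟨hwt, ht⟩
    have hpw : prev ≤ w := h2 w (by simp)
    by_cases he : w = prev
    · subst he
      have : wcScan w c (w :: t) = wcScan w c t := by simp [wcScan]
      rw [this, ih w c ht hwt]
      simp [List.toFinset_cons]
    · have hlt : prev < w := lt_of_le_of_ne hpw (fun h => he h.symm)
      have : wcScan prev c (w :: t) = wcScan w (c + 1) t := by simp [wcScan, he]
      rw [this, ih w (c + 1) ht hwt]
      have hnm : prev ∉ (w :: t).toFinset := by
        simp only [List.toFinset_cons, Finset.mem_insert, List.mem_toFinset]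
        rintro (h | h)
        · exact absurd h (ne_of_lt hlt)
        · exact absurd rfl (ne_of_lt (lt_of_lt_of_le hlt (hwt prev h)))
      have hcard : ((prev :: w :: t).toFinset.card : Int)
          = ((w :: t).toFinset.card : Int) + 1 := by
        rw [List.toFinset_cons, Finset.card_insert_of_notMem hnm]
        push_cast; ring
      rw [hcard]; ring

theorem wcB_card (ws : List String) :
    (match PySem.List.sorted ws (fun x => x) false with
      | [] => (0 : Int)
      | p :: rest => wcScan p 1 rest) = (ws.toFinset.card : Int) := by
  have hperm := PySem.List.sorted_perm ws (fun x => x) false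
  have hpw := PySem.List.sorted_pairwise ws (fun x => x)
  cases hs : PySem.List.sorted ws (fun x => x) false with
  | nil =>
    have : ws = [] := (hs ▸ hperm).symm.eq_nil
    simp [this]
  | cons p rest =>
    rw [hs] at hperm hpw
    rcases List.pairwise_cons.mp hpw with ⟨hpr, hrest⟩
    have := wcScan_card rest p 1 hrest hpr
    simp only [this]
    have : (p :: rest).toFinset = ws.toFinset := List.toFinset_eq_of_perm _ _ hperm
    rw [this]; ring

-- ===== VERDICT (by name: the statement is the Claim_ definition above) =====
theorem words_counter_spec : Claim_equal_words_counter := by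
  intro text _
  unfold Spec_words_counter words_counter words_counter_alt
  rw [wcA_card, wcB_card]
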